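-- pv_equiv track=rewrite | github.com/wowoduang/AIVideoGPT | app/services/narrated_highlight_mapper.py | _find_closest_name_after
-- ===== SOURCE A (Python) =====
-- from typing import Dict, List
--
-- def _find_closest_name_after(text: str, names: List[str], start: int) -> str:
--     best_name = ""
--     best_index = len(text) + 1
--     for name in names:
--         index = text.find(name, max(start, 0))
--         if index >= 0 and index < best_index:
--             best_name = name
--             best_index = index
--     return best_name
-- ===== SOURCE B (Python) =====
-- def _find_closest_name_after(text, names, start):
--     # One left-to-right scan over positions: the first position at/after start where
--     # some name starts is the minimal find-index; the first such name in list order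
--     # is exactly A's tie-break (strict '<' keeps the earlier name).
--     for i in range(max(start, 0), len(text) + 1):
--         for name in names:
--             if text.startswith(name, i):
--                 return name
--     return ""
-- ===== Notes on version B (the rewrite author's own statement) =====
-- stated objective: alternative
-- what changed: Replaces the per-name text.find minimum fold with a single left-to-right scan over positions that returns the first name (in list order) starting at the earliest position at/after start.
import Mathlib
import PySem

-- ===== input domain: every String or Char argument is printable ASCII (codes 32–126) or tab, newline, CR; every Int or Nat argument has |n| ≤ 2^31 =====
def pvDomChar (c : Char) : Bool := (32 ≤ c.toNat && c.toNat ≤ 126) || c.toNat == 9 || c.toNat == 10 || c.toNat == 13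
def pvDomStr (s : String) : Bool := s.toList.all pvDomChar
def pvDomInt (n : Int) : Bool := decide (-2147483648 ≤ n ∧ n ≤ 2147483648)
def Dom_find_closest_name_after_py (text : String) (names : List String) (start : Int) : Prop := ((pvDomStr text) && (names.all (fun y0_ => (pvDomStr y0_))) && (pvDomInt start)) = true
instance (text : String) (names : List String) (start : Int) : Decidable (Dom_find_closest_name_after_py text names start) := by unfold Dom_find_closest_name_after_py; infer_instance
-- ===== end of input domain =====

-- B replaces A's per-name find-minimum fold with one left-to-right position scan
-- returning the first name matching at the earliest position (alternative algorithm).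

-- ===== PORT A =====
def find_closest_name_after_py (text : String) (names : List String) (start : Int) : String :=
  (names.foldl (fun (b : String × Int) (name : String) =>
      let index := PySem.Str.findFrom text name (max start 0)
      if 0 ≤ index ∧ index < b.2 then (name, index) else b)
    ("", PySem.Str.len text + 1)).1

-- ===== PORT B =====
-- outer 'for i in range(...)' loop with early return; for 0 ≤ i ≤ len(text),
-- Python's text.startswith(name, i) is exactly the prefix test on text[i:].
def pvScanB (t : List Char) (names : List String) : List Int → String
  | [] => ""
  | i :: rest =>
    match names.find? (fun n => PySem.Chars.startswith (t.drop i.toNat) n.toList) with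
    | some n => n
    | none => pvScanB t names rest

def find_closest_name_after_py_alt (text : String) (names : List String) (start : Int) : String :=
  pvScanB text.toList names (PySem.List.pyRange (max start 0) (PySem.Str.len text + 1) 1)

-- ===== PRECONDITION & SPEC =====
def Spec_find_closest_name_after_py (text : String) (names : List String) (start : Int) (out : String) : Prop := out = find_closest_name_after_py_alt text names start
instance (text : String) (names : List String) (start : Int) (out : String) : Decidable (Spec_find_closest_name_after_py text names start out) := by unfold Spec_find_closest_name_after_py; infer_instance

-- ===== CLAIM (what is proved, stated in full; the proofs are below) =====
def Claim_equal_find_closest_name_after_py : Prop := ∀ (text : String) (names : List String) (start : Int), Dom_find_closest_name_after_py text names start → Spec_find_closest_name_after_py text names start (find_closest_name_after_py text names start)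

-- ===== LEMMAS AND PROOFS =====

-- A's loop body, named for the proofs (definitionally the lambda in the port).
def pvFA (text : String) (k : Int) (b : String × Int) (name : String) : String × Int :=
  let index := PySem.Str.findFrom text name k
  if 0 ≤ index ∧ index < b.2 then (name, index) else b

theorem pvFA_eq (text : String) (names : List String) (start : Int) :
    find_closest_name_after_py text names start =
      (names.foldl (pvFA text (max start 0)) ("", PySem.Str.len text + 1)).1 := rfl

-- start index past the end of the text: Python's find returns -1 (even for '').
theorem pvFindFrom_past (t n : List Char) (k : Int) (h0 : 0 ≤ k) (h : (t.length : Int) < k) :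
    PySem.Chars.findFrom t n k none = -1 := by
  simp only [PySem.Chars.findFrom]
  split_ifs with h1 h2 h3 <;> omega

-- match at j ⇒ findFrom = j
theorem pvFind_at (t n : List Char) (j : Nat) (hj : j ≤ t.length) (h : n <+: t.drop j) :
    PySem.Chars.findFrom t n (j : Int) = (j : Int) := by
  have hne : PySem.Chars.findFrom t n (j : Int) ≠ -1 := by
    rw [ne_eq, PySem.Chars.findFrom_natCast_eq_neg_one_iff t n j hj]
    exact not_not_intro h.isInfix
  obtain ⟨hk, hpre, hmin⟩ := PySem.Chars.findFrom_natCast_spec t n j hj hne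
  by_contra hne2
  have hlt : j < (PySem.Chars.findFrom t n (j : Int)).toNat := by omega
  exact hmin j le_rfl hlt h

-- no match at j ⇒ findFrom ≠ j
theorem pvFind_ne (t n : List Char) (j : Nat) (hj : j ≤ t.length) (h : ¬ n <+: t.drop j) :
    PySem.Chars.findFrom t n (j : Int) ≠ (j : Int) := by
  intro he
  have hne : PySem.Chars.findFrom t n (j : Int) ≠ -1 := by rw [he]; omega
  obtain ⟨hk, hpre, hmin⟩ := PySem.Chars.findFrom_natCast_spec t n j hj hne
  rw [he] at hpre
  simp at hpre
  exact h hpre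

-- nonnegative result is ≥ the start index
theorem pvFind_ge (t n : List Char) (j : Nat) (hj : j ≤ t.length)
    (h : 0 ≤ PySem.Chars.findFrom t n (j : Int)) : (j : Int) ≤ PySem.Chars.findFrom t n (j : Int) :=
  (PySem.Chars.findFrom_natCast_spec t n j hj (by omega)).1

theorem pvPrefix_drop_infix (t n : List Char) (i : Nat) (h : n <+: t.drop i) : n <:+: t :=
  h.isInfix.trans (List.drop_suffix i t).isInfix

-- no match at j ⇒ searching from j and from j+1 agree
theorem pvFind_shift (t n : List Char) (j : Nat) (hj : j ≤ t.length) (h : ¬ n <+: t.drop j) :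
    PySem.Chars.findFrom t n (j : Int) = PySem.Chars.findFrom t n ((j : Int) + 1) := by
  rcases Nat.lt_or_ge j t.length with hlt | hge
  · -- j < len: compare the two first occurrences
    have hj1 : j + 1 ≤ t.length := hlt
    have hcast : ((j : Int) + 1) = ((j + 1 : Nat) : Int) := by push_cast; ring
    rw [hcast]
    by_cases hr : PySem.Chars.findFrom t n (j : Int) = -1
    · rw [hr]
      symm
      rw [PySem.Chars.findFrom_natCast_eq_neg_one_iff t n (j+1) hj1]
      rw [PySem.Chars.findFrom_natCast_eq_neg_one_iff t n j hj] at hr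
      intro hinf
      apply hr
      have hdd : List.drop (j+1) t = List.drop 1 (List.drop j t) := by
        rw [List.drop_drop]
      rw [hdd] at hinf
      exact hinf.trans (List.drop_suffix 1 (t.drop j)).isInfix
    · obtain ⟨hk, hpre, hmin⟩ := PySem.Chars.findFrom_natCast_spec t n j hj hr
      have h0 : 0 ≤ PySem.Chars.findFrom t n (j : Int) := by omega
      set r := (PySem.Chars.findFrom t n (j : Int)).toNat with hrdef
      have hrj : j ≤ r := by omega
      have hrne : r ≠ j := fun he => h (he ▸ hpre)
      have hrge : j + 1 ≤ r := by omega
      -- occurrence at r witnesses a find from j+1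
      have hinf1 : n <:+: t.drop (j+1) := by
        have hdd : t.drop r = (t.drop (j+1)).drop (r - (j+1)) := by
          rw [List.drop_drop]; congr 1; omega
        rw [hdd] at hpre
        exact pvPrefix_drop_infix _ n _ hpre
      have hne1 : PySem.Chars.findFrom t n ((j+1 : Nat) : Int) ≠ -1 := by
        rw [ne_eq, PySem.Chars.findFrom_natCast_eq_neg_one_iff t n (j+1) hj1]
        exact not_not_intro hinf1
      obtain ⟨hk1, hpre1, hmin1⟩ := PySem.Chars.findFrom_natCast_spec t n (j+1) hj1 hne1
      set r1 := (PySem.Chars.findFrom t n ((j+1 : Nat) : Int)).toNat with hr1def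
      have hr1ge : j + 1 ≤ r1 := by omega
      have hrr : r = r1 := by
        rcases Nat.lt_trichotomy r r1 with hc | hc | hc
        · exact absurd hpre (hmin1 r hrge hc)
        · exact hc
        · exact absurd hpre1 (hmin r1 (by omega) hc)
      omega
  · -- j = len: both are -1
    have hjl : j = t.length := le_antisymm hj hge
    have hleft : PySem.Chars.findFrom t n (j : Int) = -1 := by
      rw [PySem.Chars.findFrom_natCast_eq_neg_one_iff t n j hj]
      intro hinf
      apply h
      have hnil : t.drop j = [] := by rw [hjl, List.drop_length]
      rw [hnil] at hinf ⊢
      simpa using hinf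
    have hright : PySem.Chars.findFrom t n ((j : Int) + 1) = -1 :=
      pvFindFrom_past t n ((j : Int) + 1) (by omega) (by omega)
    rw [hleft, hright]

-- fold keeps the accumulator when no name can improve it
theorem pvFold_stick (text : String) (k : Int) (l : List String) (b : String × Int)
    (h : ∀ n ∈ l, ¬ (0 ≤ PySem.Str.findFrom text n k ∧ PySem.Str.findFrom text n k < b.2)) :
    l.foldl (pvFA text k) b = b := by
  induction l with
  | nil => rfl
  | cons a l ih =>
    have ha := h a (by simp)
    simp only [List.foldl_cons, pvFA]
    rw [if_neg ha]
    exact ih (fun n hn => h n (by simp [hn]))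

-- fold over names none of which matches at j keeps the best index above j
theorem pvFold_above (text : String) (j : Nat) (hj : j ≤ text.toList.length) (l : List String)
    (hl : ∀ n ∈ l, ¬ n.toList <+: text.toList.drop j) :
    ∀ b : String × Int, (j : Int) < b.2 → (j : Int) < (l.foldl (pvFA text (j : Int)) b).2 := by
  induction l with
  | nil => intro b hb; exact hb
  | cons a l ih =>
    intro b hb
    simp only [List.foldl_cons, pvFA, PySem.Str.findFrom_eq]
    split_ifs with hc
    · apply ih (fun n hn => hl n (by simp [hn]))
      have hge := pvFind_ge text.toList a.toList j hj hc.1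
      have hne := pvFind_ne text.toList a.toList j hj (hl a (by simp))
      simp only
      omega
    · exact ih (fun n hn => hl n (by simp [hn])) b hb

-- main induction: A's fold from start k equals B's scan over [k, len]
theorem pvMain (text : String) (names : List String) :
    ∀ (d : Nat) (k : Int), 0 ≤ k → (text.toList.length : Int) + 1 - k ≤ (d : Int) →
      (names.foldl (pvFA text k) ("", PySem.Str.len text + 1)).1 =
        pvScanB text.toList names (PySem.List.pyRange k (PySem.Str.len text + 1) 1) := by
  intro d
  induction d with
  | zero =>
    intro k hk hd
    have hpast : (text.toList.length : Int) < k := by omega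
    rw [PySem.List.pyRange_one_eq_nil (by rw [PySem.Str.len_eq]; omega)]
    rw [pvFold_stick text k names _ (fun n _ => by
      simp only [PySem.Str.findFrom_eq]
      rw [pvFindFrom_past text.toList n.toList k hk hpast]
      omega)]
    rfl
  | succ d ih =>
    intro k hk hd
    by_cases hpast : (text.toList.length : Int) < k
    · rw [PySem.List.pyRange_one_eq_nil (by rw [PySem.Str.len_eq]; omega)]
      rw [pvFold_stick text k names _ (fun n _ => by
        simp only [PySem.Str.findFrom_eq]
        rw [pvFindFrom_past text.toList n.toList k hk hpast]
        omega)]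
      rfl
    · -- k = j ≤ len
      obtain ⟨j, rfl⟩ : ∃ j : Nat, k = (j : Int) := ⟨k.toNat, by omega⟩
      have hjle : j ≤ text.toList.length := by omega
      rw [PySem.List.pyRange_one_cons (by rw [PySem.Str.len_eq]; omega)]
      simp only [pvScanB, Int.toNat_natCast]
      rcases hfind : names.find? (fun n => PySem.Chars.startswith (text.toList.drop j) n.toList)
        with _ | n
      · -- no name matches at j: shift every findFrom to j+1 and recurse
        rw [hfind]
        have hnomatch : ∀ n ∈ names, ¬ n.toList <+: text.toList.drop j := by
          intro n hn hp
          exact List.find?_eq_none.mp hfind n hn ((PySem.Chars.startswith_iff _ _).mpr hp)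
        rw [PySem.List.foldl_congr_mem names (pvFA text (j : Int)) (pvFA text ((j : Int) + 1)) _ (by
          intro acc n hn
          simp only [pvFA, PySem.Str.findFrom_eq]
          rw [pvFind_shift text.toList n.toList j hjle (hnomatch n hn)])]
        exact ih ((j : Int) + 1) (by omega) (by omega)
      · -- first matching name n at position j: A's fold lands on (n, j) and sticks
        rw [hfind]
        rw [List.find?_eq_some_iff_append] at hfind
        obtain ⟨hpn, pre, post, hsplit, hpre⟩ := hfind
        have hpn' : n.toList <+: text.toList.drop j :=
          (PySem.Chars.startswith_iff _ _).mp hpn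
        have hprenm : ∀ a ∈ pre, ¬ a.toList <+: text.toList.drop j := by
          intro a ha hp
          have hba := hpre a ha
          rw [(PySem.Chars.startswith_iff _ _).mpr hp] at hba
          simp at hba
        rw [hsplit, List.foldl_append, List.foldl_cons]
        have habove : (j : Int) < (pre.foldl (pvFA text (j : Int)) ("", PySem.Str.len text + 1)).2 := by
          apply pvFold_above text j hjle pre hprenm
          rw [PySem.Str.len_eq]; omega
        have hstep : pvFA text (j : Int) (pre.foldl (pvFA text (j : Int)) ("", PySem.Str.len text + 1)) n
            = (n, (j : Int)) := by
          simp only [pvFA, PySem.Str.findFrom_eq]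
          rw [pvFind_at text.toList n.toList j hjle hpn']
          rw [if_pos ⟨by omega, habove⟩]
        rw [hstep]
        have hstick : post.foldl (pvFA text (j : Int)) (n, (j : Int)) = (n, (j : Int)) := by
          apply pvFold_stick
          intro a ha
          simp only [PySem.Str.findFrom_eq]
          rintro ⟨h0, hlt⟩
          have hge := pvFind_ge text.toList a.toList j hjle h0
          omega
        rw [hstick]

-- ===== VERDICT (by name: the statement is the Claim_ definition above) =====
theorem find_closest_name_after_py_spec : Claim_equal_find_closest_name_after_py := by
  intro text names start _
  unfold Spec_find_closest_name_after_py find_closest_name_after_py_alt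
  rw [pvFA_eq]
  exact pvMain text names (text.toList.length + 1 - (max start 0).toNat) (max start 0)
    (by omega) (by omega)
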